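-- pv_equiv track=rewrite | github.com/JeongEunJi1127/Algorithm | Programmers/60060.py | solution
-- ===== SOURCE A (Python) =====
-- from bisect import bisect_left, bisect_right
--
-- def count_range(l,start,end):
--     return bisect_right(l,end) - bisect_left(l,start)
--
-- def solution(words, queries):
--     answer = []
--     # 단어의 길이는 최대 10000
--     d = [[] for _ in range(10001)]
--     reversed_d = [[] for _ in range(10001)]
--
--     for word in words:
--         d[len(word)].append(word)
--         reversed_d[len(word)].append(word[::-1])
--
--     for i in range(10001):
--         d[i].sort()
--         reversed_d[i].sort()
--
--     for query in queries:
--         if query[0] != "?":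
--             ans = count_range(d[len(query)], query.replace("?", "a"), query.replace("?","z"))
--         else:
--             ans =  count_range(reversed_d[len(query)], query[::-1].replace("?", "a"), query[::-1].replace("?","z"))
--         answer.append(ans)
--     return answer
-- ===== SOURCE B (Python) =====
-- def solution(words, queries):
--     # One linear counting scan per query: no length buckets, no sorting, no bisect.
--     # count(words <= hi) - count(words < lo) over same-length words equals the
--     # bisect range count A computes on its sorted bucket.
--     answer = []
--     for query in queries:
--         n = len(query)
--         if query[0] != "?":
--             lo = query.replace("?", "a")
--             hi = query.replace("?", "z")
--             c = sum(1 for w in words if len(w) == n and w <= hi) \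
--               - sum(1 for w in words if len(w) == n and w < lo)
--         else:
--             r = query[::-1]
--             lo = r.replace("?", "a")
--             hi = r.replace("?", "z")
--             c = sum(1 for w in words if len(w) == n and w[::-1] <= hi) \
--               - sum(1 for w in words if len(w) == n and w[::-1] < lo)
--         answer.append(c)
--     return answer
-- ===== Notes on version B (the rewrite author's own statement) =====
-- stated objective: simpler
-- what changed: Replaced A's 10001 length-bucket table + per-bucket sorting + bisect binary searches with a single direct linear counting scan per query: count(same-length words <= hi) - count(same-length words < lo), which is exactly the range count the bisect difference computes; no buckets, no sorting, no binary search.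
import Mathlib
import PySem

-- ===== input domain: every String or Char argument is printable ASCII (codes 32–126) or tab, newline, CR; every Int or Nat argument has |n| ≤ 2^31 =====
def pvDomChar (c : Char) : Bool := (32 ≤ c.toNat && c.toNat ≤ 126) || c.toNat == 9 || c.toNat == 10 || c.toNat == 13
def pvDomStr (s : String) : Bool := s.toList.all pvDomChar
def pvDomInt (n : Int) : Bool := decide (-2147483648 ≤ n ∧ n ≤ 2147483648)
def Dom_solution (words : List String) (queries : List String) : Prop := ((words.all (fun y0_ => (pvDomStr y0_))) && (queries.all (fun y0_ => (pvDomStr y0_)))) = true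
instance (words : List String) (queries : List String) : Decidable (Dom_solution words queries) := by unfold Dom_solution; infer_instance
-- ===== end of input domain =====

-- B replaces A's 10001 sorted length-buckets + bisect by a direct linear counting
-- scan per query (count(words ≤ hi) − count(words < lo) over same-length words);
-- objective: simpler (no buckets, no sorting, no binary search).

-- ===== PORT A =====
-- s[::-1]
def pyRev (s : String) : String := (PySem.Str.slice? s none none (-1)).getD ""

-- count_range(l, start, end) = bisect_right(l, end) - bisect_left(l, start)
def count_range (l : List String) (start : String) (stop : String) : Int :=
  (PySem.List.bisectRight l stop : Int) - (PySem.List.bisectLeft l start : Int)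

-- body of A's first for-loop: append word / word[::-1] to the bucket of its length
def buildStep (p : List (List String) × List (List String)) (word : String) :
    List (List String) × List (List String) :=
  (p.1.set word.toList.length (p.1.getD word.toList.length [] ++ [word]),
   p.2.set word.toList.length (p.2.getD word.toList.length [] ++ [pyRev word]))

def solution (words : List String) (queries : List String) : List Int :=
  let dz := words.foldl buildStep (List.replicate 10001 [], List.replicate 10001 [])
  -- for i in range(10001): d[i].sort() (ditto reversed_d)
  let d := dz.1.map (fun l => PySem.List.sorted l (fun x => x) false)
  let reversed_d := dz.2.map (fun l => PySem.List.sorted l (fun x => x) false)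
  queries.foldl (fun answer query =>
    let ans : Int :=
      if PySem.Str.pyGet? query 0 ≠ some '?' then
        count_range (d.getD query.toList.length [])
          (PySem.Str.replace query "?" "a") (PySem.Str.replace query "?" "z")
      else
        count_range (reversed_d.getD query.toList.length [])
          (PySem.Str.replace (pyRev query) "?" "a") (PySem.Str.replace (pyRev query) "?" "z")
    answer ++ [ans]) []

-- ===== PORT B =====
-- sum(1 for w in words if p(w))
def countOnes (words : List String) (p : String → Bool) : Int :=
  (words.map (fun w => if p w then (1 : Int) else 0)).sum

def solution_alt (words : List String) (queries : List String) : List Int :=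
  queries.foldl (fun answer query =>
    let n := PySem.Str.len query
    let c : Int :=
      if PySem.Str.pyGet? query 0 ≠ some '?' then
        let lo := PySem.Str.replace query "?" "a"
        let hi := PySem.Str.replace query "?" "z"
        countOnes words (fun w => PySem.Str.len w == n && decide (w ≤ hi))
          - countOnes words (fun w => PySem.Str.len w == n && decide (w < lo))
      else
        let r := pyRev query
        let lo := PySem.Str.replace r "?" "a"
        let hi := PySem.Str.replace r "?" "z"
        countOnes words (fun w => PySem.Str.len w == n && decide (pyRev w ≤ hi))
          - countOnes words (fun w => PySem.Str.len w == n && decide (pyRev w < lo))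
    answer ++ [c]) []

-- ===== PRECONDITION & SPEC =====
-- Pre_ excludes exactly the inputs where A raises IndexError: an empty query
-- (query[0]) or a word/query longer than 10000 (indexing the 10001 buckets).
def Pre_solution (words : List String) (queries : List String) : Prop :=
  (∀ w ∈ words, w.toList.length ≤ 10000) ∧
  (∀ q ∈ queries, q.toList.length ≠ 0 ∧ q.toList.length ≤ 10000)
instance (words : List String) (queries : List String) : Decidable (Pre_solution words queries) := by
  unfold Pre_solution; infer_instance

def pvWitness_solution : List String × List String := (["frodo", "front", "frost", "frame", "kakao"], ["fro??", "????o", "fr???", "fro???", "pro?"])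

def Spec_solution (words : List String) (queries : List String) (out : List Int) : Prop := out = solution_alt words queries
instance (words : List String) (queries : List String) (out : List Int) : Decidable (Spec_solution words queries out) := by unfold Spec_solution; infer_instance

-- ===== CLAIM (what is proved, stated in full; the proofs are below) =====
def Claim_equal_solution : Prop := ∀ (words : List String) (queries : List String), Dom_solution words queries → Pre_solution words queries → Spec_solution words queries (solution words queries)

-- ===== LEMMAS AND PROOFS =====

-- a predicate true exactly on the first k positions has count k
lemma countP_eq_of_split {α : Type} (p : α → Bool) :
    ∀ (xs : List α) (k : Nat), k ≤ xs.length →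
      (∀ j (hj : j < xs.length), (p xs[j] = true ↔ j < k)) → xs.countP p = k := by
  intro xs
  induction xs with
  | nil => intro k hk _; simp at hk ⊢; omega
  | cons x xs ih =>
    intro k hk h
    cases k with
    | zero =>
      rw [List.countP_eq_zero]
      intro a ha
      obtain ⟨j, hj, rfl⟩ := List.mem_iff_getElem.mp ha
      have := h j hj
      simp_all
    | succ k =>
      have hx : p x = true := by
        have := (h 0 (by simp)).mpr (by omega)
        simpa using this
      rw [List.countP_cons, hx]
      have : xs.countP p = k := by
        apply ih k (by simpa using hk)
        intro j hj
        have := h (j + 1) (by simpa using Nat.succ_lt_succ hj)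
        simpa [Nat.succ_lt_succ_iff] using this
      simp [this]

-- bisect_left's loop invariant, on lists of strings
lemma bisectLeftLoop_props (xs : List String) (x : String)
    (hs : xs.Pairwise (· ≤ ·)) :
    ∀ (fuel lo hi : Nat), lo ≤ hi → hi ≤ xs.length → hi - lo ≤ fuel →
      (∀ j (hj : j < xs.length), j < lo → xs[j] < x) →
      (∀ j (hj : j < xs.length), hi ≤ j → x ≤ xs[j]) →
      lo ≤ PySem.List.bisectLeftLoop xs x fuel lo hi ∧
      PySem.List.bisectLeftLoop xs x fuel lo hi ≤ hi ∧
      (∀ j (hj : j < xs.length), j < PySem.List.bisectLeftLoop xs x fuel lo hi → xs[j] < x) ∧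
      (∀ j (hj : j < xs.length), PySem.List.bisectLeftLoop xs x fuel lo hi ≤ j → x ≤ xs[j]) := by
  have hmono := List.pairwise_iff_getElem.mp hs
  intro fuel
  induction fuel with
  | zero =>
    intro lo hi h1 h2 h3 hlo hhi
    have : lo = hi := by omega
    rw [PySem.List.bisectLeftLoop.eq_def]
    subst this
    exact ⟨le_refl _, le_refl _, hlo, hhi⟩
  | succ fuel ih =>
    intro lo hi h1 h2 h3 hlo hhi
    rw [PySem.List.bisectLeftLoop.eq_def]
    by_cases hlt : lo < hi
    · simp only [hlt, if_true]
      have hmidlt : (lo + hi) / 2 < xs.length := by omega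
      rw [List.getElem?_eq_getElem hmidlt]
      by_cases hy : xs[(lo + hi) / 2] < x
      · simp only [hy, if_true]
        have := ih ((lo + hi) / 2 + 1) hi (by omega) h2 (by omega)
          (fun j hj hjlt => by
            rcases Nat.lt_or_ge j ((lo + hi) / 2) with h | h
            · exact lt_of_le_of_lt (hmono j ((lo+hi)/2) hj hmidlt h) hy
            · have : j = (lo + hi) / 2 := by omega
              subst this; exact hy)
          hhi
        refine ⟨by omega, this.2.1, this.2.2.1, this.2.2.2⟩
      · simp only [hy, if_false]
        have hx : x ≤ xs[(lo + hi) / 2] := le_of_not_gt hy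
        have := ih lo ((lo + hi) / 2) (by omega) (by omega) (by omega) hlo
          (fun j hj hjge => by
            rcases Nat.eq_or_lt_of_le hjge with h | h
            · simpa [← h] using hx
            · exact le_trans hx (hmono ((lo+hi)/2) j hmidlt hj h))
        refine ⟨this.1, by omega, this.2.2.1, this.2.2.2⟩
    · simp only [hlt, if_false]
      have : lo = hi := by omega
      subst this
      exact ⟨le_refl _, le_refl _, hlo, hhi⟩

lemma bisectRightLoop_props (xs : List String) (x : String)
    (hs : xs.Pairwise (· ≤ ·)) :
    ∀ (fuel lo hi : Nat), lo ≤ hi → hi ≤ xs.length → hi - lo ≤ fuel →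
      (∀ j (hj : j < xs.length), j < lo → xs[j] ≤ x) →
      (∀ j (hj : j < xs.length), hi ≤ j → x < xs[j]) →
      lo ≤ PySem.List.bisectRightLoop xs x fuel lo hi ∧
      PySem.List.bisectRightLoop xs x fuel lo hi ≤ hi ∧
      (∀ j (hj : j < xs.length), j < PySem.List.bisectRightLoop xs x fuel lo hi → xs[j] ≤ x) ∧
      (∀ j (hj : j < xs.length), PySem.List.bisectRightLoop xs x fuel lo hi ≤ j → x < xs[j]) := by
  have hmono := List.pairwise_iff_getElem.mp hs
  intro fuel
  induction fuel with
  | zero =>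
    intro lo hi h1 h2 h3 hlo hhi
    have : lo = hi := by omega
    rw [PySem.List.bisectRightLoop.eq_def]
    subst this
    exact ⟨le_refl _, le_refl _, hlo, hhi⟩
  | succ fuel ih =>
    intro lo hi h1 h2 h3 hlo hhi
    rw [PySem.List.bisectRightLoop.eq_def]
    by_cases hlt : lo < hi
    · simp only [hlt, if_true]
      have hmidlt : (lo + hi) / 2 < xs.length := by omega
      rw [List.getElem?_eq_getElem hmidlt]
      by_cases hy : x < xs[(lo + hi) / 2]
      · simp only [hy, if_true]
        have := ih lo ((lo + hi) / 2) (by omega) (by omega) (by omega) hlo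
          (fun j hj hjge => by
            rcases Nat.eq_or_lt_of_le hjge with h | h
            · simpa [← h] using hy
            · exact lt_of_lt_of_le hy (hmono ((lo+hi)/2) j hmidlt hj h))
        refine ⟨this.1, by omega, this.2.2.1, this.2.2.2⟩
      · simp only [hy, if_false]
        have hx : xs[(lo + hi) / 2] ≤ x := le_of_not_gt hy
        have := ih ((lo + hi) / 2 + 1) hi (by omega) h2 (by omega)
          (fun j hj hjlt => by
            rcases Nat.lt_or_ge j ((lo + hi) / 2) with h | h
            · exact le_trans (hmono j ((lo+hi)/2) hj hmidlt h) hx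
            · have : j = (lo + hi) / 2 := by omega
              subst this; exact hx)
          hhi
        refine ⟨by omega, this.2.1, this.2.2.1, this.2.2.2⟩
    · simp only [hlt, if_false]
      have : lo = hi := by omega
      subst this
      exact ⟨le_refl _, le_refl _, hlo, hhi⟩

lemma bisectLeft_countP (xs : List String) (x : String) (hs : xs.Pairwise (· ≤ ·)) :
    PySem.List.bisectLeft xs x = xs.countP (fun y => decide (y < x)) := by
  obtain ⟨h1, h2, h3, h4⟩ := bisectLeftLoop_props xs x hs xs.length 0 xs.length
    (by omega) (le_refl _) (by omega) (by omega) (by omega)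
  rw [PySem.List.bisectLeft]
  symm
  apply countP_eq_of_split
  · exact h2
  · intro j hj
    constructor
    · intro hp
      by_contra hge
      exact absurd (by simpa using hp) (not_lt_of_ge (h4 j hj (by omega)))
    · intro hjk
      simpa using h3 j hj hjk

lemma bisectRight_countP (xs : List String) (x : String) (hs : xs.Pairwise (· ≤ ·)) :
    PySem.List.bisectRight xs x = xs.countP (fun y => decide (y ≤ x)) := by
  obtain ⟨h1, h2, h3, h4⟩ := bisectRightLoop_props xs x hs xs.length 0 xs.length
    (by omega) (le_refl _) (by omega) (by omega) (by omega)
  rw [PySem.List.bisectRight]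
  symm
  apply countP_eq_of_split
  · exact h2
  · intro j hj
    constructor
    · intro hp
      by_contra hge
      exact absurd (by simpa using hp) (not_le_of_gt (h4 j hj (by omega)))
    · intro hjk
      simpa using h3 j hj hjk

lemma count_range_sorted (xs : List String) (lo hi : String) :
    count_range (PySem.List.sorted xs (fun x => x) false) lo hi
      = (xs.countP (fun w => decide (w ≤ hi)) : Int) - (xs.countP (fun w => decide (w < lo)) : Int) := by
  have hp : (PySem.List.sorted xs (fun x => x) false).Pairwise (· ≤ ·) := by
    simpa using PySem.List.sorted_pairwise xs (fun x => x)
  rw [count_range, bisectLeft_countP _ _ hp, bisectRight_countP _ _ hp,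
    (PySem.List.sorted_perm xs (fun x => x) false).countP_eq,
    (PySem.List.sorted_perm xs (fun x => x) false).countP_eq]

lemma getD_set_self (d : List (List String)) (i : Nat) (v : List String) (h : i < d.length) :
    (d.set i v).getD i [] = v := by
  simp [List.getD_eq_getElem?_getD, h]

lemma getD_set_ne (d : List (List String)) (i j : Nat) (v : List String) (h : i ≠ j) :
    (d.set i v).getD j [] = d.getD j [] := by
  simp [List.getD_eq_getElem?_getD, h]


-- the bucket at index L after A's first loop is the subsequence of words of length L
lemma build_spec (ws : List String) :
    ∀ (d rd : List (List String)),
      (∀ w ∈ ws, w.toList.length < d.length) → (∀ w ∈ ws, w.toList.length < rd.length) →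
      ((ws.foldl buildStep (d, rd)).1.length = d.length ∧
       (ws.foldl buildStep (d, rd)).2.length = rd.length) ∧
      ∀ L : Nat,
        (ws.foldl buildStep (d, rd)).1.getD L [] =
          d.getD L [] ++ ws.filter (fun w => w.toList.length == L) ∧
        (ws.foldl buildStep (d, rd)).2.getD L [] =
          rd.getD L [] ++ (ws.filter (fun w => w.toList.length == L)).map pyRev := by
  induction ws with
  | nil => intro d rd _ _; simp
  | cons w ws ih =>
    intro d rd hd hrd
    have hwd : w.toList.length < d.length := hd w (by simp)
    have hwrd : w.toList.length < rd.length := hrd w (by simp)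
    rw [List.foldl_cons]
    have hd' : ∀ v ∈ ws, v.toList.length < (buildStep (d, rd) w).1.length := by
      intro v hv; simpa [buildStep] using hd v (by simp [hv])
    have hrd' : ∀ v ∈ ws, v.toList.length < (buildStep (d, rd) w).2.length := by
      intro v hv; simpa [buildStep] using hrd v (by simp [hv])
    obtain ⟨⟨hl1, hl2⟩, hgd⟩ := ih (buildStep (d, rd) w).1 (buildStep (d, rd) w).2 hd' hrd'
    refine ⟨⟨by simpa [buildStep] using hl1, by simpa [buildStep] using hl2⟩, ?_⟩
    intro L
    have := hgd L
    by_cases hL : w.toList.length = L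
    · subst hL
      rw [List.filter_cons_of_pos (by simp)]
      constructor
      · rw [this.1, show (buildStep (d, rd) w).1 = d.set w.toList.length (d.getD w.toList.length [] ++ [w]) from rfl,
          getD_set_self _ _ _ hwd]
        simp
      · rw [this.2, show (buildStep (d, rd) w).2 = rd.set w.toList.length (rd.getD w.toList.length [] ++ [pyRev w]) from rfl,
          getD_set_self _ _ _ hwrd]
        simp
    · rw [List.filter_cons_of_neg (by simpa using hL)]
      constructor
      · rw [this.1, show (buildStep (d, rd) w).1 = d.set w.toList.length (d.getD w.toList.length [] ++ [w]) from rfl,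
          getD_set_ne _ _ _ _ hL]
      · rw [this.2, show (buildStep (d, rd) w).2 = rd.set w.toList.length (rd.getD w.toList.length [] ++ [pyRev w]) from rfl,
          getD_set_ne _ _ _ _ hL]

-- getD through map, in range
lemma getD_map_of_lt (d : List (List String)) (f : List String → List String) (L : Nat)
    (h : L < d.length) : (d.map f).getD L [] = f (d.getD L []) := by
  rw [List.getD_eq_getElem?_getD, List.getElem?_map, List.getElem?_eq_getElem h,
    List.getD_eq_getElem?_getD, List.getElem?_eq_getElem h]
  rfl

lemma getD_replicate_nil (n L : Nat) :
    (List.replicate n ([] : List String)).getD L [] = [] := by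
  rw [List.getD_eq_getElem?_getD, List.getElem?_replicate]
  split <;> rfl

-- countOnes is a countP
lemma countOnes_eq (words : List String) (p : String → Bool) :
    countOnes words p = (words.countP p : Int) := by
  rw [countOnes]
  exact PySem.List.sum_map_ite_one_zero p words

-- ===== VERDICT (by name: the statement is the Claim_ definition above) =====
theorem solution_spec : Claim_equal_solution := by
  intro words queries _ hpre
  obtain ⟨hw, hq⟩ := hpre
  unfold Spec_solution
  simp only [solution, solution_alt]
  rw [PySem.List.foldl_append_singleton_eq_map, PySem.List.foldl_append_singleton_eq_map]
  simp only [List.nil_append]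
  apply List.map_congr_left
  intro query hmem
  obtain ⟨hq0, hqle⟩ := hq query hmem
  have hwlt1 : ∀ w ∈ words, w.toList.length < (List.replicate 10001 ([] : List String)).length := by
    intro w hwm; have := hw w hwm; rw [List.length_replicate]; omega
  obtain ⟨⟨hl1, hl2⟩, hgd⟩ := build_spec words (List.replicate 10001 []) (List.replicate 10001 []) hwlt1 hwlt1
  set dz := words.foldl buildStep (List.replicate 10001 [], List.replicate 10001 []) with hdz
  have hLlt : query.toList.length < dz.1.length := by rw [hl1, List.length_replicate]; omega
  have hLlt2 : query.toList.length < dz.2.length := by rw [hl2, List.length_replicate]; omega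
  obtain ⟨hg1, hg2⟩ := hgd query.toList.length
  rw [getD_replicate_nil, List.nil_append] at hg1 hg2
  split_ifs with hc
  · rw [getD_map_of_lt _ _ _ hLlt, hg1, count_range_sorted,
      List.countP_filter, List.countP_filter, countOnes_eq, countOnes_eq]
    congr 1 <;>
    · congr 1
      apply List.countP_congr
      intro w _
      simp [PySem.Str.len_eq, Bool.and_comm]
  · rw [getD_map_of_lt _ _ _ hLlt2, hg2, count_range_sorted,
      List.countP_map, List.countP_map, List.countP_filter, List.countP_filter,
      countOnes_eq, countOnes_eq]
    congr 1 <;>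
    · congr 1
      apply List.countP_congr
      intro w _
      simp [PySem.Str.len_eq, Bool.and_comm, Function.comp]
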